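-- pv_equiv track=rewrite | github.com/MariyamB/Python | boolexpr.py | is_in_semester
-- ===== SOURCE A (Python) =====
-- def is_in_semester(month,day):
--
--     while month==1 and (day>=29 and day<=31):
--         return True
--     while month==2 and (day>=1 and day<=28):
--         return True
--     while month == 3 and (day >=1 and day <= 31):
--         return True
--     while month == 4 and (day >=1 and day <= 30):
--         return True
--     while month == 5 and (day >=1 and day <= 31):
--         return True
--
--     return False
-- ===== SOURCE B (Python) =====
-- _DAYS = [31, 28, 31, 30, 31]  # month lengths Jan..May
--
-- def is_in_semester(month, day):
--     # Convert (month, day) to a day-of-year ordinal and test one interval: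
--     # the semester is Jan 29 .. May 31, i.e. ordinals 29..151.
--     if not (1 <= month <= 5 and 1 <= day <= _DAYS[month - 1]):
--         return False
--     ordinal = sum(_DAYS[:month - 1]) + day
--     return 29 <= ordinal <= 151
-- ===== Notes on version B (the rewrite author's own statement) =====
-- stated objective: alternative
-- what changed: Instead of five per-month guard-and-return branches, B validates the date against a month-length table, converts it to a day-of-year ordinal by a prefix sum, and tests membership in the single interval [29, 151] (Jan 29 .. May 31).
import Mathlib
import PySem

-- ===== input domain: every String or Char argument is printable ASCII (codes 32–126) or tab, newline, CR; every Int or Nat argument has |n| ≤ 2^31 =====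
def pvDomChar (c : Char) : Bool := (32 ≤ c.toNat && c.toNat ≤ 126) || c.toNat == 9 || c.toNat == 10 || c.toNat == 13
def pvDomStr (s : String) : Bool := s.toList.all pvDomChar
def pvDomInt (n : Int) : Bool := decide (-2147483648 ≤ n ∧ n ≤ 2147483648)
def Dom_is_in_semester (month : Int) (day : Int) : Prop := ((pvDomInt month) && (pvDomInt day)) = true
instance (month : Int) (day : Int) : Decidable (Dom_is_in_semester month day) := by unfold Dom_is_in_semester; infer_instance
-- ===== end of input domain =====

-- B replaces A's five guard-and-return branches by date validation against a
-- month-length table plus one day-of-year interval test (objective: alternative).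


-- ===== PORT A =====
-- each 'while cond: return True' fires at most once, so it is 'if cond then true else …'
def is_in_semester (month : Int) (day : Int) : Bool :=
  if month == 1 && (day ≥ 29 && day ≤ 31) then true
  else if month == 2 && (day ≥ 1 && day ≤ 28) then true
  else if month == 3 && (day ≥ 1 && day ≤ 31) then true
  else if month == 4 && (day ≥ 1 && day ≤ 30) then true
  else if month == 5 && (day ≥ 1 && day ≤ 31) then true
  else false

-- ===== PORT B =====
def semMonthDays : List Int := [31, 28, 31, 30, 31]

def is_in_semester_alt (month : Int) (day : Int) : Bool :=
  -- _DAYS[month - 1] is only evaluated under 1 ≤ month ≤ 5 (Python's 'and' short-circuits),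
  -- so the pyGetD default 0 is never read: the index is in range there.
  if 1 ≤ month && month ≤ 5 && 1 ≤ day
      && day ≤ PySem.List.pyGetD semMonthDays (month - 1) 0 then
    let ordinal := (PySem.List.slice semMonthDays none (some (month - 1))).sum + day
    decide (29 ≤ ordinal) && decide (ordinal ≤ 151)
  else false

-- ===== PRECONDITION & SPEC =====
def Spec_is_in_semester (month : Int) (day : Int) (out : Bool) : Prop := out = is_in_semester_alt month day
instance (month : Int) (day : Int) (out : Bool) : Decidable (Spec_is_in_semester month day out) := by unfold Spec_is_in_semester; infer_instance

-- ===== CLAIM (what is proved, stated in full; the proofs are below) =====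
def Claim_equal_is_in_semester : Prop := ∀ (month : Int) (day : Int), Dom_is_in_semester month day → Spec_is_in_semester month day (is_in_semester month day)

-- ===== LEMMAS AND PROOFS =====

-- ===== VERDICT (by name: the statement is the Claim_ definition above) =====
theorem is_in_semester_spec : Claim_equal_is_in_semester := by
  intro month day _
  unfold Spec_is_in_semester is_in_semester is_in_semester_alt semMonthDays
  by_cases h1 : month = 1 <;> by_cases h2 : month = 2 <;> by_cases h3 : month = 3 <;>
    by_cases h4 : month = 4 <;> by_cases h5 : month = 5 <;>
    simp_all [PySem.List.pyGetD, PySem.List.pyGet?, PySem.List.pyIdx?, PySem.List.slice] <;> try omega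
  rw [Bool.eq_iff_iff]
  simp only [Bool.and_eq_true, decide_eq_true_eq]
  omega
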